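-- pv_equiv track=rewrite | github.com/DylanTagrin/Biswas-Lab-E_Field-Percolation-Simulation | data_analysis.py | split_relax_runs
-- ===== SOURCE A (Python) =====
-- def split_relax_runs(relax_iterations, relax_error):
--     if len(relax_iterations) != len(relax_error):
--         raise ValueError("relax_iterations and relax_error must have the same length")
--
--     runs = []
--     current_iters = []
--     current_errs = []
--     prev_iter = None
--
--     for it, err in zip(relax_iterations, relax_error):
--         if prev_iter is not None and it < prev_iter:
--             runs.append((current_iters, current_errs))
--             current_iters = []
--             current_errs = []
--
--         current_iters.append(it)
--         current_errs.append(err)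
--         prev_iter = it
--
--     if current_iters:
--         runs.append((current_iters, current_errs))
--
--     return runs
-- ===== SOURCE B (Python) =====
-- def split_relax_runs(relax_iterations, relax_error):
--     if len(relax_iterations) != len(relax_error):
--         raise ValueError("relax_iterations and relax_error must have the same length")
--
--     pairs = list(zip(relax_iterations, relax_error))
--     n = len(pairs)
--     runs = []
--     i = 0
--     while i < n:
--         k = i + 1
--         while k < n and pairs[k][0] >= pairs[k - 1][0]:
--             k += 1
--         runs.append(([p[0] for p in pairs[i:k]], [p[1] for p in pairs[i:k]]))
--         i = k
--     return runs
-- ===== Notes on version B (the rewrite author's own statement) =====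
-- stated objective: alternative
-- what changed: A accumulates the current run element-by-element with a prev-value flag and flushes at each decrease; B repeatedly measures the length of the maximal non-decreasing prefix run and slices it off in one step.
import Mathlib
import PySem

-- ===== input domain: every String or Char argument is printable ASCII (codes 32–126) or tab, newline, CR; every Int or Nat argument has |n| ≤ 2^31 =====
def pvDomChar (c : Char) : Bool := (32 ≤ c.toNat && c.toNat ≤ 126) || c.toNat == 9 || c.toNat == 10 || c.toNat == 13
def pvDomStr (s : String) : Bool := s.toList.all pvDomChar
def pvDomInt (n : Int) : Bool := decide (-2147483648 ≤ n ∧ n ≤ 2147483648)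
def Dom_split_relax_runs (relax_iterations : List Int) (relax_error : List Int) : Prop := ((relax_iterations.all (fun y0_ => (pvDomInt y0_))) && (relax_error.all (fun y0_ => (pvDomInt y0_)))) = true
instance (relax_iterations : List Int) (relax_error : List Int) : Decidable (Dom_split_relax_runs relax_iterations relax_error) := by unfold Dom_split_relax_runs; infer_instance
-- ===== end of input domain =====

-- B replaces A's element-by-element accumulator loop by repeatedly slicing off the maximal
-- non-decreasing prefix run; alternative decomposition, same cost.


-- ===== PORT A =====
-- A's for-loop over zip(relax_iterations, relax_error) with state (runs, current_iters,
-- current_errs, prev_iter); the trailing 'if current_iters: runs.append(...)' is the base case.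
def loopA : List (Int × Int) → List (List Int × List Int) → List Int → List Int → Option Int →
    List (List Int × List Int)
  | [], runs, ci, ce, _ => if ci.isEmpty then runs else runs ++ [(ci, ce)]
  | (it, err) :: rest, runs, ci, ce, none =>
      loopA rest runs (ci ++ [it]) (ce ++ [err]) (some it)
  | (it, err) :: rest, runs, ci, ce, some p =>
      if it < p then loopA rest (runs ++ [(ci, ce)]) [it] [err] (some it)
      else loopA rest runs (ci ++ [it]) (ce ++ [err]) (some it)

def split_relax_runs (relax_iterations : List Int) (relax_error : List Int) : List (List Int × List Int) :=
  if relax_iterations.length ≠ relax_error.length then []  -- Python raises ValueError here; excluded by Pre_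
  else loopA (relax_iterations.zip relax_error) [] [] [] none

-- ===== PORT B =====
-- inner while: 'while k < n and pairs[k][0] >= pairs[k-1][0]: k += 1'
-- (getD is exact here: the loop only reads pairs[k], pairs[k-1] with k-1 < k < n = pairs.length)
def innerB (pairs : List (Int × Int)) (k : Nat) : Nat :=
  if k < pairs.length ∧ (pairs.getD (k - 1) (0, 0)).1 ≤ (pairs.getD k (0, 0)).1
  then innerB pairs (k + 1) else k
  termination_by pairs.length - k
  decreasing_by omega

theorem innerB_ge (pairs : List (Int × Int)) (k : Nat) : k ≤ innerB pairs k := by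
  induction k using innerB.induct pairs with
  | case1 k h ih => rw [innerB, if_pos h]; omega
  | case2 k h => rw [innerB, if_neg h]

-- outer while: slice pairs[i:k] (in-range slice ported by hand as take (k-i) ∘ drop i, exact
-- for 0 ≤ i ≤ k) into one run, continue at i = k
def outerB (pairs : List (Int × Int)) (i : Nat) : List (List Int × List Int) :=
  if h : i < pairs.length then
    let k := innerB pairs (i + 1)
    (((pairs.drop i).take (k - i)).map Prod.fst, ((pairs.drop i).take (k - i)).map Prod.snd)
      :: outerB pairs k
  else []
  termination_by pairs.length - i
  decreasing_by have := innerB_ge pairs (i + 1); omega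

def split_relax_runs_alt (relax_iterations : List Int) (relax_error : List Int) : List (List Int × List Int) :=
  if relax_iterations.length ≠ relax_error.length then []  -- Python raises ValueError here; excluded by Pre_
  else outerB (relax_iterations.zip relax_error) 0

-- ===== PRECONDITION & SPEC =====
-- Pre_ excludes exactly the inputs on which A raises ValueError (unequal lengths); B raises there too.
def Pre_split_relax_runs (relax_iterations : List Int) (relax_error : List Int) : Prop :=
  relax_iterations.length = relax_error.length
instance (relax_iterations : List Int) (relax_error : List Int) : Decidable (Pre_split_relax_runs relax_iterations relax_error) := by unfold Pre_split_relax_runs; infer_instance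

def pvWitness_split_relax_runs : List Int × List Int := ([1, 2, 1, 3], [5, 6, 7, 8])

def Spec_split_relax_runs (relax_iterations : List Int) (relax_error : List Int) (out : List (List Int × List Int)) : Prop := out = split_relax_runs_alt relax_iterations relax_error
instance (relax_iterations : List Int) (relax_error : List Int) (out : List (List Int × List Int)) : Decidable (Spec_split_relax_runs relax_iterations relax_error out) := by unfold Spec_split_relax_runs; infer_instance

-- ===== CLAIM (what is proved, stated in full; the proofs are below) =====
def Claim_equal_split_relax_runs : Prop := ∀ (relax_iterations : List Int) (relax_error : List Int), Dom_split_relax_runs relax_iterations relax_error → Pre_split_relax_runs relax_iterations relax_error → Spec_split_relax_runs relax_iterations relax_error (split_relax_runs relax_iterations relax_error)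

-- ===== LEMMAS AND PROOFS =====

-- run-structured middle form used to relate A's accumulator loop and B's index loops
def runLen : Int → List (Int × Int) → Nat
  | _, [] => 0
  | prev, (it, _) :: rest => if it < prev then 0 else 1 + runLen it rest

def goB : List (Int × Int) → List (List Int × List Int)
  | [] => []
  | (i, e) :: rest =>
      let k := runLen i rest
      (((i, e) :: rest.take k).map Prod.fst, ((i, e) :: rest.take k).map Prod.snd)
        :: goB (rest.drop k)
  termination_by l => l.length
  decreasing_by simp

-- A's loop after the first element, with the runs flushed so far factored out.
def glue : List Int → List Int → Int → List (Int × Int) → List (List Int × List Int)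
  | ci, ce, _, [] => [(ci, ce)]
  | ci, ce, p, (it, err) :: rest =>
      if it < p then (ci, ce) :: glue [it] [err] it rest
      else glue (ci ++ [it]) (ce ++ [err]) it rest

theorem goB_nil : goB [] = [] := by
  rw [goB.eq_def]

theorem goB_cons (i e : Int) (rest : List (Int × Int)) :
    goB ((i, e) :: rest) =
      (i :: (rest.take (runLen i rest)).map Prod.fst,
       e :: (rest.take (runLen i rest)).map Prod.snd)
        :: goB (rest.drop (runLen i rest)) := by
  rw [goB.eq_def]
  simp

theorem loopA_eq_glue (l : List (Int × Int)) :
    ∀ (runs : List (List Int × List Int)) (ci ce : List Int) (p : Int), ci ≠ [] →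
      loopA l runs ci ce (some p) = runs ++ glue ci ce p l := by
  induction l with
  | nil =>
      intro runs ci ce p h
      simp only [loopA, glue, List.isEmpty_iff]
      rw [if_neg h]
  | cons x rest ih =>
      intro runs ci ce p h
      obtain ⟨it, err⟩ := x
      by_cases hlt : it < p
      · simp only [loopA, glue, if_pos hlt]
        rw [ih (runs ++ [(ci, ce)]) [it] [err] it (by simp)]
        simp
      · simp only [loopA, glue, if_neg hlt]
        exact ih runs (ci ++ [it]) (ce ++ [err]) it (by simp)

theorem glue_eq_goB (l : List (Int × Int)) :
    ∀ (ci ce : List Int) (p : Int),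
      glue ci ce p l =
        (ci ++ (l.take (runLen p l)).map Prod.fst, ce ++ (l.take (runLen p l)).map Prod.snd)
          :: goB (l.drop (runLen p l)) := by
  induction l with
  | nil => intro ci ce p; simp [glue, runLen, goB_nil]
  | cons x rest ih =>
      intro ci ce p
      obtain ⟨it, err⟩ := x
      by_cases hlt : it < p
      · simp only [glue, runLen, if_pos hlt, List.take_zero, List.drop_zero]
        rw [ih [it] [err] it, goB_cons]
        simp
      · simp only [glue, runLen, if_neg hlt, Nat.add_comm 1, List.take_succ_cons,
          List.drop_succ_cons]
        rw [ih (ci ++ [it]) (ce ++ [err]) it]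
        simp

theorem runLen_cons (prev : Int) (x : Int × Int) (rest : List (Int × Int)) :
    runLen prev (x :: rest) = if x.1 < prev then 0 else 1 + runLen x.1 rest := by
  cases x; simp [runLen]

theorem innerB_eq (pairs : List (Int × Int)) (j : Nat) (hj : 1 ≤ j) :
    innerB pairs j = j + runLen (pairs.getD (j - 1) (0, 0)).1 (pairs.drop j) := by
  induction j using innerB.induct pairs with
  | case1 j h ih =>
      rw [innerB, if_pos h, ih (by omega)]
      have hgd : pairs.getD j (0, 0) = pairs[j] := List.getD_eq_getElem _ _ h.1
      have h1 : j + 1 - 1 = j := by omega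
      rw [h1, hgd, List.drop_eq_getElem_cons h.1, runLen_cons,
        if_neg (by have := h.2; rw [hgd] at this; omega)]
      omega
  | case2 j h =>
      rw [innerB, if_neg h]
      by_cases hlen : j < pairs.length
      · rw [List.drop_eq_getElem_cons hlen, runLen_cons,
          if_pos (by push_neg at h; have := h hlen; rw [List.getD_eq_getElem _ _ hlen] at this; exact this)]
        simp
      · rw [List.drop_eq_nil_iff.mpr (by omega)]
        simp [runLen]

theorem outerB_eq_goB_aux (pairs : List (Int × Int)) :
    ∀ (m i : Nat), pairs.length - i ≤ m → outerB pairs i = goB (pairs.drop i) := by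
  intro m
  induction m with
  | zero =>
      intro i hi
      rw [outerB, dif_neg (by omega), List.drop_eq_nil_iff.mpr (by omega), goB_nil]
  | succ m ih =>
      intro i hi
      by_cases h : i < pairs.length
      · rw [outerB, dif_pos h]
        have hge := innerB_ge pairs (i + 1)
        show (((pairs.drop i).take (innerB pairs (i + 1) - i)).map Prod.fst,
              ((pairs.drop i).take (innerB pairs (i + 1) - i)).map Prod.snd)
            :: outerB pairs (innerB pairs (i + 1)) = goB (pairs.drop i)
        rw [ih (innerB pairs (i + 1)) (by omega)]
        have hk : innerB pairs (i + 1)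
            = (i + 1) + runLen (pairs.getD i (0, 0)).1 (pairs.drop (i + 1)) := by
          have := innerB_eq pairs (i + 1) (by omega)
          simpa using this
        rw [List.getD_eq_getElem _ _ h] at hk
        rw [List.drop_eq_getElem_cons h, hk, goB_cons]
        have hsub : i + 1 + runLen pairs[i].1 (pairs.drop (i + 1)) - i
            = 1 + runLen pairs[i].1 (pairs.drop (i + 1)) := by omega
        rw [hsub, Nat.add_comm 1, List.take_succ_cons]
        have hdd : pairs.drop (i + 1 + runLen pairs[i].1 (pairs.drop (i + 1)))
            = (pairs.drop (i + 1)).drop (runLen pairs[i].1 (pairs.drop (i + 1))) := by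
          rw [List.drop_drop]
        rw [hdd]
        simp
      · rw [outerB, dif_neg h, List.drop_eq_nil_iff.mpr (by omega), goB_nil]

theorem outerB_eq_goB (pairs : List (Int × Int)) (i : Nat) :
    outerB pairs i = goB (pairs.drop i) :=
  outerB_eq_goB_aux pairs (pairs.length - i) i (le_refl _)

-- ===== VERDICT (by name: the statement is the Claim_ definition above) =====
theorem split_relax_runs_spec : Claim_equal_split_relax_runs := by
  intro ri re _ hpre
  show split_relax_runs ri re = split_relax_runs_alt ri re
  unfold split_relax_runs split_relax_runs_alt
  rw [if_neg (by simpa using hpre), if_neg (by simpa using hpre)]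
  rw [show outerB (ri.zip re) 0 = goB (ri.zip re) by rw [outerB_eq_goB, List.drop_zero]]
  cases hz : ri.zip re with
  | nil => simp [loopA, goB_nil]
  | cons x rest =>
      obtain ⟨i, e⟩ := x
      simp only [loopA, List.nil_append]
      rw [loopA_eq_glue rest [] [i] [e] i (by simp), glue_eq_goB, goB_cons]
      simp
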